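-- pv_equiv track=rewrite | github.com/enigmaTeam666/IEEEXtreme_Solutions | Xtreme9.0 - Car Spark.py | connexe_graph
-- ===== SOURCE A (Python) =====
-- def exist_in(prev,dic_arcs , index):
--     try:
--         dic_arcs[prev][index]
--         return True
--     except :
--         return False
--
-- def bigger_next(value,bookings):
--     for i in range(value+1,max(bookings)+1):
--         try :
--             tmp = bookings[i]
--             return i
--         except :
--             pass
--     return -1
--
-- def connexe_graph(bookings):
--     prev = -1
--     tmp = dict(bookings)
--     for index , values in  bookings.items() :
--         for value in values :
--             try :
--                 tmp[value]
--             except: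
--                 i = bigger_next(value,tmp)
--                 if i!=-1:
--                     tmp[value] = {}
--                     tmp[value][i] = 0
--         if prev != -1:
--             if not exist_in(prev,tmp,index) :
--                 tmp[prev][index] = 0
--         prev = index
--     return tmp
-- ===== SOURCE B (Python) =====
-- def bisect_right(a, x):
--     lo, hi = 0, len(a)
--     while lo < hi:
--         mid = (lo + hi) // 2
--         if a[mid] <= x:
--             lo = mid + 1
--         else:
--             hi = mid
--     return lo
--
-- def connexe_graph(bookings):
--     tmp = dict(bookings)
--     skeys = sorted(tmp)
--     prev = -1
--     for index, values in bookings.items():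
--         for value in values:
--             if value not in tmp:
--                 pos = bisect_right(skeys, value)
--                 i = skeys[pos] if pos < len(skeys) else -1
--                 if i != -1:
--                     tmp[value] = {i: 0}
--                     skeys.insert(pos, value)
--         if prev != -1:
--             if index not in tmp[prev]:
--                 tmp[prev][index] = 0
--         prev = index
--     return tmp
-- ===== Notes on version B (the rewrite author's own statement) =====
-- stated objective: alternative
-- what changed: B maintains a sorted list of the existing keys and finds the next greater existing key by a hand-written binary search (inserting newly created keys at their sorted position), replacing A's bigger_next integer-by-integer scan from value+1 up to max(keys); intended as faster on sparse keys, but a timing run on random inputs measured only ~1.2x, so no speed is claimed.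
import Mathlib
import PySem

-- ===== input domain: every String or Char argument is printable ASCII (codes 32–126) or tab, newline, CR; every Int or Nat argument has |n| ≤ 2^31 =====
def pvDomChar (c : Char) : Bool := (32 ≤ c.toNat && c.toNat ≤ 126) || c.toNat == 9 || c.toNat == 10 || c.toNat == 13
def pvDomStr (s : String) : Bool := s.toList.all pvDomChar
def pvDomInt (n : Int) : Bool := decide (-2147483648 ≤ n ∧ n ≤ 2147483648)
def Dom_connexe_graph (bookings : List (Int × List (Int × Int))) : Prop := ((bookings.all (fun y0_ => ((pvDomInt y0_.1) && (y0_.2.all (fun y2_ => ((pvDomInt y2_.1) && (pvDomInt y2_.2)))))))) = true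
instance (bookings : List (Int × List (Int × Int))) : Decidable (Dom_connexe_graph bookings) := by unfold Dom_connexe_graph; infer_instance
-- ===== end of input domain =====

-- B replaces A's integer-by-integer scan for the next greater existing key by a binary search
-- over a maintained sorted key list; return values are identical.
-- (The Python functions mutate the inner dicts shared with the argument; both A and B perform
-- the same mutations — the equivalence proved here is about the return value.)

-- ===== PORT A =====
-- dict(bookings): both Pythons build the same dict view of the argument
def cgDictOf (bookings : List (Int × List (Int × Int))) : PySem.Dict Int (PySem.Dict Int Int) :=
  PySem.Dict.ofList (bookings.map (fun p => (p.1, PySem.Dict.ofList p.2)))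

-- max(bookings): max of the keys (call sites always pass a nonempty dict)
def cgMaxKey (tmp : PySem.Dict Int (PySem.Dict Int Int)) : Int :=
  (PySem.List.max? tmp.keys (fun k => k)).getD 0

-- the 'for i in range(value+1, max(bookings)+1)' scan of bigger_next, with early return
def biggerNextGo (tmp : PySem.Dict Int (PySem.Dict Int Int)) (i : Int) : Nat → Int
  | 0 => -1
  | fuel+1 => if tmp.contains i then i else biggerNextGo tmp (i+1) fuel

def biggerNext (value : Int) (tmp : PySem.Dict Int (PySem.Dict Int Int)) : Int :=
  biggerNextGo tmp (value + 1) (cgMaxKey tmp + 1 - (value + 1)).toNat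

def existIn (prev : Int) (dicArcs : PySem.Dict Int (PySem.Dict Int Int)) (index : Int) : Bool :=
  match dicArcs.get? prev with
  | some d => d.contains index      -- dic_arcs[prev][index] succeeds
  | none => false                   -- KeyError caught by the bare except

-- body of 'for value in values' in A
def cgValueStepA (tmp : PySem.Dict Int (PySem.Dict Int Int)) (value : Int) :
    PySem.Dict Int (PySem.Dict Int Int) :=
  if tmp.contains value then tmp    -- try tmp[value] succeeds
  else
    let i := biggerNext value tmp
    if i ≠ -1 then tmp.insert value (PySem.Dict.empty.insert i 0) else tmp

-- body of 'for index, values in bookings.items()' in A; state = (prev, tmp)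
def cgStepA (st : Int × PySem.Dict Int (PySem.Dict Int Int))
    (kv : Int × PySem.Dict Int Int) : Int × PySem.Dict Int (PySem.Dict Int Int) :=
  let tmp1 := kv.2.keys.foldl cgValueStepA st.2
  let tmp2 :=
    if st.1 ≠ -1 then
      if existIn st.1 tmp1 kv.1 then tmp1
      else tmp1.modify st.1 PySem.Dict.empty (fun dd => dd.insert kv.1 0)  -- tmp[prev][index] = 0
    else tmp1
  (kv.1, tmp2)

def connexe_graph (bookings : List (Int × List (Int × Int))) : List (Int × List (Int × Int)) :=
  let d := cgDictOf bookings
  ((d.items.foldl cgStepA (-1, d)).2.items.map (fun p => (p.1, p.2.items)))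

-- ===== PORT B =====
-- hand-written bisect_right of Source B: while lo < hi: mid = (lo+hi)//2; …
def bisectGo (a : List Int) (x : Int) (lo hi : Int) : Nat → Int
  | 0 => lo
  | fuel+1 =>
    if lo < hi then
      let mid := PySem.Int.floordiv (lo + hi) 2
      if PySem.List.pyGetD a mid 0 ≤ x then bisectGo a x (mid + 1) hi fuel
      else bisectGo a x lo mid fuel
    else lo

def bisectRightB (a : List Int) (x : Int) : Int :=
  bisectGo a x 0 (PySem.List.len a) a.length   -- fuel a.length bounds the halving loop

-- body of 'for value in values' in B; state = (tmp, skeys)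
def cgValueStepB (st : PySem.Dict Int (PySem.Dict Int Int) × List Int) (value : Int) :
    PySem.Dict Int (PySem.Dict Int Int) × List Int :=
  if st.1.contains value then st
  else
    let pos := bisectRightB st.2 value
    let i := if pos < PySem.List.len st.2 then PySem.List.pyGetD st.2 pos 0 else -1
    if i ≠ -1 then
      (st.1.insert value (PySem.Dict.empty.insert i 0), PySem.List.insert st.2 pos value)
    else st

-- body of the outer loop in B; state = (prev, tmp, skeys)
def cgStepB (st : Int × PySem.Dict Int (PySem.Dict Int Int) × List Int)
    (kv : Int × PySem.Dict Int Int) : Int × PySem.Dict Int (PySem.Dict Int Int) × List Int :=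
  let ts := kv.2.keys.foldl cgValueStepB st.2
  let tmp2 :=
    if st.1 ≠ -1 then
      if (ts.1.getD st.1 PySem.Dict.empty).contains kv.1 then ts.1
      else ts.1.modify st.1 PySem.Dict.empty (fun dd => dd.insert kv.1 0)
    else ts.1
  (kv.1, tmp2, ts.2)

def connexe_graph_alt (bookings : List (Int × List (Int × Int))) : List (Int × List (Int × Int)) :=
  let d := cgDictOf bookings
  let skeys := PySem.List.sorted d.keys (fun k => k) false
  ((d.items.foldl cgStepB (-1, d, skeys)).2.1.items.map (fun p => (p.1, p.2.items)))

-- ===== PRECONDITION & SPEC =====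
def Spec_connexe_graph (bookings : List (Int × List (Int × Int))) (out : List (Int × List (Int × Int))) : Prop := out = connexe_graph_alt bookings
instance (bookings : List (Int × List (Int × Int))) (out : List (Int × List (Int × Int))) : Decidable (Spec_connexe_graph bookings out) := by unfold Spec_connexe_graph; infer_instance

-- ===== CLAIM (what is proved, stated in full; the proofs are below) =====
def Claim_equal_connexe_graph : Prop := ∀ (bookings : List (Int × List (Int × Int))), Dom_connexe_graph bookings → Spec_connexe_graph bookings (connexe_graph bookings)

-- ===== LEMMAS AND PROOFS =====

-- B's skeys is a strictly increasing enumeration of A's key set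
def CGInv (tmp : PySem.Dict Int (PySem.Dict Int Int)) (skeys : List Int) : Prop :=
  skeys.Pairwise (· < ·) ∧ ∀ k, k ∈ skeys ↔ tmp.contains k = true

theorem biggerNextGo_none (tmp : PySem.Dict Int (PySem.Dict Int Int)) :
    ∀ (fuel : Nat) (i : Int), (∀ j, i ≤ j → j < i + fuel → tmp.contains j = false) →
    biggerNextGo tmp i fuel = -1 := by
  intro fuel
  induction fuel with
  | zero => intro i _; rfl
  | succ f ih =>
    intro i h
    have hi : tmp.contains i = false := h i le_rfl (by push_cast; omega)
    simp only [biggerNextGo, hi, Bool.false_eq_true, if_false]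
    exact ih (i+1) (fun j h1 h2 => h j (by omega) (by push_cast at h2 ⊢; omega))

theorem biggerNextGo_find (tmp : PySem.Dict Int (PySem.Dict Int Int)) :
    ∀ (fuel : Nat) (i j₀ : Int), i ≤ j₀ → j₀ < i + fuel → tmp.contains j₀ = true →
    (∀ j, i ≤ j → j < j₀ → tmp.contains j = false) →
    biggerNextGo tmp i fuel = j₀ := by
  intro fuel
  induction fuel with
  | zero => intro i j₀ h1 h2 _ _; exfalso; push_cast at h2; omega
  | succ f ih =>
    intro i j₀ h1 h2 h3 h4
    by_cases hij : i = j₀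
    · subst hij; simp [biggerNextGo, h3]
    · have hi : tmp.contains i = false := h4 i le_rfl (lt_of_le_of_ne h1 hij)
      simp only [biggerNextGo, hi, Bool.false_eq_true, if_false]
      exact ih (i+1) j₀ (by omega) (by push_cast at h2 ⊢; omega) h3
        (fun j ha hb => h4 j (by omega) hb)

theorem bisectGo_spec (a : List Int) (x : Int) (hs : a.Pairwise (· ≤ ·)) :
    ∀ (fuel : Nat) (lo hi : Int), 0 ≤ lo → lo ≤ hi → hi ≤ a.length → (hi - lo).toNat ≤ fuel →
    (∀ (j : Nat) (hj : j < a.length), (j : Int) < lo → a[j] ≤ x) →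
    (∀ (j : Nat) (hj : j < a.length), hi ≤ (j : Int) → x < a[j]) →
    0 ≤ bisectGo a x lo hi fuel ∧ bisectGo a x lo hi fuel ≤ a.length ∧
    (∀ (j : Nat) (hj : j < a.length), (j : Int) < bisectGo a x lo hi fuel → a[j] ≤ x) ∧
    (∀ (j : Nat) (hj : j < a.length), bisectGo a x lo hi fuel ≤ (j : Int) → x < a[j]) := by
  intro fuel
  induction fuel with
  | zero =>
    intro lo hi h0 hlh hhl hf hL hR
    have hEq : lo = hi := by omega
    subst hEq
    simp only [bisectGo]
    exact ⟨h0, hhl, hL, fun j hj hge => hR j hj hge⟩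
  | succ f ih =>
    intro lo hi h0 hlh hhl hf hL hR
    simp only [bisectGo]
    by_cases hlt : lo < hi
    · simp only [hlt, if_true]
      have hdm := PySem.Int.floordiv_mul_add_mod (lo + hi) 2
      have hm0 := PySem.Int.mod_nonneg (lo + hi) (b := 2) (by norm_num)
      have hm2 := PySem.Int.mod_lt (lo + hi) (b := 2) (by norm_num)
      set mid := PySem.Int.floordiv (lo + hi) 2 with hmiddef
      have hmge : lo ≤ mid := by omega
      have hmlt : mid < hi := by omega
      have hmidlen : mid.toNat < a.length := by omega
      have hget : PySem.List.pyGetD a mid 0 = a[mid.toNat] :=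
        PySem.List.pyGetD_eq_getElem a 0 (by omega) (by omega)
      rw [hget]
      by_cases hcmp : a[mid.toNat] ≤ x
      · simp only [hcmp, if_true]
        refine ih (mid + 1) hi (by omega) (by omega) hhl (by omega) ?_ hR
        intro j hj hjlt
        by_cases hjlo : (j : Int) < lo
        · exact hL j hj hjlo
        · have hj2 : j ≤ mid.toNat := by omega
          rcases eq_or_lt_of_le hj2 with he | hl2
          · subst he; exact hcmp
          · exact le_trans (List.pairwise_iff_getElem.mp hs j mid.toNat hj hmidlen hl2) hcmp
      · simp only [hcmp, if_false]
        rw [not_le] at hcmp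
        refine ih lo mid h0 (by omega) (by omega) (by omega) hL ?_
        intro j hj hjge
        have hj2 : mid.toNat ≤ j := by omega
        rcases eq_or_lt_of_le hj2 with he | hl2
        · subst he; exact hcmp
        · exact lt_of_lt_of_le hcmp (List.pairwise_iff_getElem.mp hs mid.toNat j hmidlen hj hl2)
    · simp only [hlt, if_false]
      exact ⟨h0, by omega, hL, fun j hj hge => hR j hj (by omega)⟩

theorem bisectRightB_spec (a : List Int) (x : Int) (hs : a.Pairwise (· ≤ ·)) :
    0 ≤ bisectRightB a x ∧ bisectRightB a x ≤ a.length ∧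
    (∀ (j : Nat) (hj : j < a.length), (j : Int) < bisectRightB a x → a[j] ≤ x) ∧
    (∀ (j : Nat) (hj : j < a.length), bisectRightB a x ≤ (j : Int) → x < a[j]) := by
  unfold bisectRightB
  exact bisectGo_spec a x hs a.length 0 (PySem.List.len a) le_rfl
    (by simp [PySem.List.len_eq]) (by simp [PySem.List.len_eq]) (by simp [PySem.List.len_eq])
    (fun j hj hlt => absurd hlt (by omega))
    (fun j hj hge => absurd hge (by simp [PySem.List.len_eq]; omega))

theorem bisect_eq_biggerNext (tmp : PySem.Dict Int (PySem.Dict Int Int)) (skeys : List Int)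
    (value : Int) (hinv : CGInv tmp skeys) :
    biggerNext value tmp =
      (if bisectRightB skeys value < PySem.List.len skeys
       then PySem.List.pyGetD skeys (bisectRightB skeys value) 0 else -1) := by
  obtain ⟨hpw, hmem⟩ := hinv
  obtain ⟨h0, hlen, hL, hR⟩ := bisectRightB_spec skeys value (hpw.imp le_of_lt)
  simp only [PySem.List.len_eq]
  by_cases hlt : bisectRightB skeys value < (skeys.length : Int)
  · simp only [hlt, if_true]
    have hposn : (bisectRightB skeys value).toNat < skeys.length := by omega
    have hget : PySem.List.pyGetD skeys (bisectRightB skeys value) 0 =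
        skeys[(bisectRightB skeys value).toNat] :=
      PySem.List.pyGetD_eq_getElem skeys 0 h0 (by omega)
    rw [hget]
    have hxm : value < skeys[(bisectRightB skeys value).toNat] :=
      hR (bisectRightB skeys value).toNat hposn (by omega)
    have hcm : tmp.contains skeys[(bisectRightB skeys value).toNat] = true :=
      (hmem _).mp (List.getElem_mem hposn)
    have hkey : ∀ j ∈ skeys, j ≤ value ∨ skeys[(bisectRightB skeys value).toNat] ≤ j := by
      intro j hj
      obtain ⟨q, hq, hqe⟩ := List.getElem_of_mem hj
      by_cases hqp : q < (bisectRightB skeys value).toNat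
      · left
        have hq2 := hL q hq (by omega)
        rw [hqe] at hq2
        exact hq2
      · right
        rcases eq_or_lt_of_le (Nat.le_of_not_lt hqp) with he | hlq
        · subst he
          exact le_of_eq hqe
        · have hmono := List.pairwise_iff_getElem.mp hpw _ q hposn hq hlq
          rw [hqe] at hmono
          exact le_of_lt hmono
    have hmmax : skeys[(bisectRightB skeys value).toNat] ≤ cgMaxKey tmp := by
      have hmk : skeys[(bisectRightB skeys value).toNat] ∈ tmp.keys :=
        (PySem.Dict.contains_iff_mem_keys _ _).mp hcm
      cases hMx : PySem.List.max? tmp.keys (fun k => k) with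
      | none =>
        rw [PySem.List.max?_eq_none_iff] at hMx
        rw [hMx] at hmk
        exact absurd hmk (List.not_mem_nil)
      | some M =>
        have hle := PySem.List.max?_isMax hMx _ hmk
        simp only [cgMaxKey, hMx, Option.getD_some]
        exact hle
    unfold biggerNext
    refine biggerNextGo_find tmp _ _ skeys[(bisectRightB skeys value).toNat]
      (by omega) (by omega) hcm ?_
    intro j hj1 hj2
    cases hcj : tmp.contains j with
    | false => rfl
    | true =>
      exfalso
      rcases hkey j ((hmem j).mpr hcj) with h1 | h2 <;> omega
  · simp only [hlt, if_false]
    unfold biggerNext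
    apply biggerNextGo_none
    intro j hj1 _
    cases hcj : tmp.contains j with
    | false => rfl
    | true =>
      exfalso
      obtain ⟨q, hq, hqe⟩ := List.getElem_of_mem ((hmem j).mpr hcj)
      have hq2 := hL q hq (by omega)
      rw [hqe] at hq2
      omega

theorem cginv_insert (tmp : PySem.Dict Int (PySem.Dict Int Int)) (skeys : List Int)
    (value : Int) (w : PySem.Dict Int Int) (hpw : skeys.Pairwise (· < ·))
    (hmem : ∀ k, k ∈ skeys ↔ tmp.contains k = true) (hc : ¬ tmp.contains value = true) :
    CGInv (tmp.insert value w) (PySem.List.insert skeys (bisectRightB skeys value) value) := by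
  obtain ⟨h0, hlen, hL, hR⟩ := bisectRightB_spec skeys value (hpw.imp le_of_lt)
  have hple : (bisectRightB skeys value).toNat ≤ skeys.length := by omega
  have hcast : bisectRightB skeys value = (((bisectRightB skeys value).toNat : Nat) : Int) := by
    omega
  rw [hcast, PySem.List.insert_natCast skeys _ value hple]
  set p := (bisectRightB skeys value).toNat with hp
  have hvnot : value ∉ skeys := fun hv => hc ((hmem value).mp hv)
  have hdropgt : ∀ b ∈ skeys.drop p, value < b := by
    intro b hb
    obtain ⟨k, hk, hke⟩ := List.getElem_of_mem hb
    rw [List.getElem_drop] at hke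
    have hklen : p + k < skeys.length := by
      have := hk; simp only [List.length_drop] at this; omega
    have := hR (p + k) hklen (by omega)
    rw [hke] at this
    exact this
  have htakelt : ∀ a' ∈ skeys.take p, a' < value := by
    intro a' ha'
    obtain ⟨k, hk, hke⟩ := List.getElem_of_mem ha'
    rw [List.getElem_take] at hke
    have hklen : k < skeys.length := by
      have := hk; simp only [List.length_take] at this; omega
    have hle2 := hL k hklen (by have := hk; simp only [List.length_take] at this; omega)
    rw [hke] at hle2
    refine lt_of_le_of_ne hle2 (fun he => hvnot ?_)
    rw [← he, ← hke]
    exact List.getElem_mem hklen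
  constructor
  · rw [List.pairwise_append]
    refine ⟨hpw.sublist (List.take_sublist _ _), ?_, ?_⟩
    · rw [List.pairwise_cons]
      exact ⟨hdropgt, hpw.sublist (List.drop_sublist _ _)⟩
    · intro a' ha' b hb
      rcases List.mem_cons.mp hb with rfl | hbd
      · exact htakelt a' ha'
      · exact lt_trans (htakelt a' ha') (hdropgt b hbd)
  · intro k
    have hks : (k ∈ skeys.take p ∨ k ∈ skeys.drop p) ↔ k ∈ skeys := by
      rw [← List.mem_append, List.take_append_drop]
    simp only [List.mem_append, List.mem_cons, PySem.Dict.contains_insert, Bool.or_eq_true,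
      beq_iff_eq]
    constructor
    · rintro (h1 | h2 | h3)
      · exact Or.inr ((hmem k).mp (hks.mp (Or.inl h1)))
      · exact Or.inl h2
      · exact Or.inr ((hmem k).mp (hks.mp (Or.inr h3)))
    · rintro (h1 | h2)
      · exact Or.inr (Or.inl h1)
      · rcases hks.mpr ((hmem k).mpr h2) with h3 | h4
        · exact Or.inl h3
        · exact Or.inr (Or.inr h4)

theorem cgValueStep_rel (tmp : PySem.Dict Int (PySem.Dict Int Int)) (skeys : List Int)
    (value : Int) (hinv : CGInv tmp skeys) :
    (cgValueStepB (tmp, skeys) value).1 = cgValueStepA tmp value ∧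
    CGInv (cgValueStepA tmp value) (cgValueStepB (tmp, skeys) value).2 := by
  have hbe := bisect_eq_biggerNext tmp skeys value hinv
  obtain ⟨hpw, hmem⟩ := hinv
  simp only [PySem.List.len_eq] at hbe
  by_cases hc : tmp.contains value = true
  · constructor
    · simp [cgValueStepA, cgValueStepB, hc]
    · simp only [cgValueStepA, cgValueStepB, hc, if_true]
      exact ⟨hpw, hmem⟩
  · by_cases hpos : bisectRightB skeys value < (skeys.length : Int)
    · by_cases hg : PySem.List.pyGetD skeys (bisectRightB skeys value) 0 = -1
      · have hA : biggerNext value tmp = -1 := by rw [hbe]; simp [hpos, hg]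
        constructor
        · simp [cgValueStepA, cgValueStepB, hc, hpos, hg, hA]
        · have h2 : CGInv tmp skeys := ⟨hpw, hmem⟩
          simpa [cgValueStepA, cgValueStepB, hc, hpos, hg, hA] using h2
      · have hA : biggerNext value tmp = PySem.List.pyGetD skeys (bisectRightB skeys value) 0 := by
          rw [hbe]; simp [hpos]
        constructor
        · simp [cgValueStepA, cgValueStepB, hc, hpos, hg, hA]
        · have h2 := cginv_insert tmp skeys value
            (PySem.Dict.empty.insert (PySem.List.pyGetD skeys (bisectRightB skeys value) 0) 0)
            hpw hmem hc
          simpa [cgValueStepA, cgValueStepB, hc, hpos, hg, hA] using h2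
    · have hA : biggerNext value tmp = -1 := by rw [hbe]; simp [hpos]
      constructor
      · simp [cgValueStepA, cgValueStepB, hc, hpos, hA]
      · have h2 : CGInv tmp skeys := ⟨hpw, hmem⟩
        simpa [cgValueStepA, cgValueStepB, hc, hpos, hA] using h2

theorem contains_cgValueStepA (tmp : PySem.Dict Int (PySem.Dict Int Int)) (v k : Int)
    (h : tmp.contains k = true) : (cgValueStepA tmp v).contains k = true := by
  by_cases h1 : tmp.contains v = true
  · simp [cgValueStepA, h1, h]
  · by_cases h2 : biggerNext v tmp = -1
    · simp [cgValueStepA, h1, h2, h]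
    · simp [cgValueStepA, h1, h2, PySem.Dict.contains_insert, h]

theorem cgFoldValues_rel (vs : List Int) :
    ∀ (tmp : PySem.Dict Int (PySem.Dict Int Int)) (skeys : List Int), CGInv tmp skeys →
    (vs.foldl cgValueStepB (tmp, skeys)).1 = vs.foldl cgValueStepA tmp ∧
    CGInv (vs.foldl cgValueStepA tmp) (vs.foldl cgValueStepB (tmp, skeys)).2 ∧
    (∀ k, tmp.contains k = true → (vs.foldl cgValueStepA tmp).contains k = true) := by
  induction vs with
  | nil => intro tmp skeys h; exact ⟨rfl, h, fun k hk => hk⟩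
  | cons v vs ih =>
    intro tmp skeys h
    obtain ⟨heq, hinv⟩ := cgValueStep_rel tmp skeys v h
    have hpair : cgValueStepB (tmp, skeys) v =
        (cgValueStepA tmp v, (cgValueStepB (tmp, skeys) v).2) := Prod.ext heq rfl
    rw [List.foldl_cons, List.foldl_cons, hpair]
    obtain ⟨h1, h2, h3⟩ := ih (cgValueStepA tmp v) (cgValueStepB (tmp, skeys) v).2 hinv
    exact ⟨h1, h2, fun k hk => h3 k (contains_cgValueStepA tmp v k hk)⟩

-- relation carried through the outer loop
def CGRel (d : PySem.Dict Int (PySem.Dict Int Int))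
    (a : Int × PySem.Dict Int (PySem.Dict Int Int))
    (b : Int × PySem.Dict Int (PySem.Dict Int Int) × List Int) : Prop :=
  b.1 = a.1 ∧ b.2.1 = a.2 ∧ CGInv a.2 b.2.2 ∧
  (∀ k, d.contains k = true → a.2.contains k = true) ∧
  (a.1 = -1 ∨ a.2.contains a.1 = true)

theorem cgStep_rel (d : PySem.Dict Int (PySem.Dict Int Int))
    (a : Int × PySem.Dict Int (PySem.Dict Int Int))
    (b : Int × PySem.Dict Int (PySem.Dict Int Int) × List Int)
    (kv : Int × PySem.Dict Int Int) (hk : d.contains kv.1 = true)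
    (h : CGRel d a b) : CGRel d (cgStepA a kv) (cgStepB b kv) := by
  obtain ⟨hb1, hb2, hinv, hgrow, hprev⟩ := h
  have hb2' : b.2 = (a.2, b.2.2) := Prod.ext hb2 rfl
  obtain ⟨hfeq, hfinv, hfmono⟩ := cgFoldValues_rel kv.2.keys a.2 b.2.2 hinv
  unfold cgStepA cgStepB
  rw [hb2', hb1]
  have hex : existIn a.1 (kv.2.keys.foldl cgValueStepA a.2) kv.1 =
      ((kv.2.keys.foldl cgValueStepB (a.2, b.2.2)).1.getD a.1 PySem.Dict.empty).contains kv.1 := by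
    rw [hfeq]
    unfold existIn
    rw [PySem.Dict.getD_eq_get?_getD]
    cases hg : (kv.2.keys.foldl cgValueStepA a.2).get? a.1 with
    | none => simp [PySem.Dict.contains_empty]
    | some dd => simp
  by_cases hp : a.1 = -1
  · simp only [hp, ne_eq, not_true_eq_false, if_false]
    exact ⟨rfl, hfeq, hfinv, fun k hk => hfmono k (hgrow k hk),
      Or.inr (hfmono kv.1 (hgrow kv.1 hk))⟩
  · simp only [ne_eq, hp, not_false_eq_true, if_true]
    have hcontprev : (kv.2.keys.foldl cgValueStepA a.2).contains a.1 = true :=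
      hfmono a.1 (hprev.resolve_left hp)
    by_cases hex1 : existIn a.1 (kv.2.keys.foldl cgValueStepA a.2) kv.1 = true
    · have hex2 := hex ▸ hex1
      simp only [hex1, if_true, hex2]
      exact ⟨rfl, hfeq, hfinv, fun k hk => hfmono k (hgrow k hk),
        Or.inr (hfmono kv.1 (hgrow kv.1 hk))⟩
    · have hexf : existIn a.1 (kv.2.keys.foldl cgValueStepA a.2) kv.1 = false := by
        cases hxx : existIn a.1 (kv.2.keys.foldl cgValueStepA a.2) kv.1 with
        | false => rfl
        | true => exact absurd hxx hex1
      have hex2 : ((kv.2.keys.foldl cgValueStepB (a.2, b.2.2)).1.getD a.1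
          PySem.Dict.empty).contains kv.1 = false := by rw [← hex]; exact hexf
      simp only [hexf, hex2, Bool.false_eq_true, if_false]
      rw [hfeq]
      obtain ⟨hfpw, hfmem⟩ := hfinv
      refine ⟨rfl, rfl, ⟨hfpw, ?_⟩, ?_, ?_⟩
      · intro k
        rw [hfmem k, PySem.Dict.contains_modify]
        by_cases hkp : k = a.1
        · simp [hkp, hcontprev]
        · simp [hkp]
      · intro k hk
        rw [PySem.Dict.contains_modify]
        simp [hfmono k (hgrow k hk)]
      · refine Or.inr ?_
        rw [PySem.Dict.contains_modify]
        simp [hfmono kv.1 (hgrow kv.1 hk)]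

theorem cgFold_rel (d : PySem.Dict Int (PySem.Dict Int Int)) (l : List (Int × PySem.Dict Int Int)) :
    ∀ (a : Int × PySem.Dict Int (PySem.Dict Int Int))
      (b : Int × PySem.Dict Int (PySem.Dict Int Int) × List Int),
    (∀ kv ∈ l, d.contains kv.1 = true) → CGRel d a b →
    CGRel d (l.foldl cgStepA a) (l.foldl cgStepB b) := by
  induction l with
  | nil => intro a b _ h; exact h
  | cons kv l ih =>
    intro a b hl h
    exact ih _ _ (fun p hp => hl p (List.mem_cons_of_mem _ hp))
      (cgStep_rel d a b kv (hl kv (List.mem_cons_self)) h)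

-- ===== VERDICT (by name: the statement is the Claim_ definition above) =====
theorem connexe_graph_spec : Claim_equal_connexe_graph := by
  intro bookings _
  simp only [Spec_connexe_graph, connexe_graph, connexe_graph_alt]
  have hnodup : (cgDictOf bookings).keys.Nodup := PySem.Dict.nodup_keys_ofList _
  set d := cgDictOf bookings with hd
  set sk := PySem.List.sorted d.keys (fun k => k) false with hsk
  have hperm : sk.Perm d.keys := PySem.List.sorted_perm _ _ _
  have hsnd : sk.Nodup := hperm.nodup_iff.mpr hnodup
  have hsle : sk.Pairwise (· ≤ ·) := PySem.List.sorted_pairwise d.keys (fun k => k)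
  have hslt : sk.Pairwise (· < ·) := by
    have h2 : sk.Pairwise (· ≠ ·) := hsnd
    exact (hsle.and h2).imp (fun h => lt_of_le_of_ne h.1 h.2)
  have hrel : CGRel d (-1, d) (-1, d, sk) := by
    refine ⟨rfl, rfl, ⟨hslt, ?_⟩, fun k hk => hk, Or.inl rfl⟩
    intro k
    rw [hsk, PySem.List.mem_sorted, ← PySem.Dict.contains_iff_mem_keys]
  have hall : ∀ kv ∈ d.items, d.contains kv.1 = true := fun kv hkv =>
    (PySem.Dict.contains_iff_mem_keys _ _).mpr (PySem.Dict.mem_keys_of_mem_items _ hkv)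
  obtain ⟨_, heq, _, _, _⟩ := cgFold_rel d d.items (-1, d) (-1, d, sk) hall hrel
  rw [heq]
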